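-- pv_equiv track=rewrite | github.com/dongyeon94/Algorithym | python/programmers/12987.py | solution
-- ===== SOURCE A (Python) =====
-- def solution(A, B):
--     answer = 0
--     A = sorted(A)
--     B = sorted(B)
--
--     for i in A:
--         for i2 in range(len(B)):
--             if i < B[i2]:
--                 answer += 1
--                 B.pop(i2)
--                 break
--
--     return answer
-- ===== SOURCE B (Python) =====
-- def solution(A, B):
--     As = sorted(A)
--     Bs = sorted(B)
--     ans = 0
--     i = j = 0
--     while i < len(As) and j < len(Bs):
--         if As[i] < Bs[j]:
--             ans += 1
--             i += 1
--             j += 1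
--         else:
--             j += 1
--     return ans
-- ===== Notes on version B (the rewrite author's own statement) =====
-- stated objective: faster
-- what changed: Replaced the per-element inner scan with pop() over the sorted B list by a single two-pointer sweep over both sorted lists, removing the quadratic inner loop.
import Mathlib
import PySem

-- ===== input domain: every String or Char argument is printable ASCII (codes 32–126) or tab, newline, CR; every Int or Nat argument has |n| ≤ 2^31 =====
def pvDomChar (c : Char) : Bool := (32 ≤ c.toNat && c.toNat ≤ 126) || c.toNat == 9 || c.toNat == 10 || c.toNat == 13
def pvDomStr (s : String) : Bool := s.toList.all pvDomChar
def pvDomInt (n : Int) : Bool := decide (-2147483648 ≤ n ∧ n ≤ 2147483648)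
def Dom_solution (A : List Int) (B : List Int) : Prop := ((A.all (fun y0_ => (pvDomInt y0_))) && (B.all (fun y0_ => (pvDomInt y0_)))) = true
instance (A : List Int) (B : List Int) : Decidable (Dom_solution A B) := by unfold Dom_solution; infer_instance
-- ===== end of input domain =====

-- B replaces A's quadratic scan-and-pop inner loop by a two-pointer sweep of both sorted lists (objective: faster, asymptotic).

-- ===== PORT A =====
-- inner loop "for i2 in range(len(B)): if i < B[i2]: answer += 1; B.pop(i2); break":
-- scan B front to back, remove the first element greater than a (none = loop fell through)
def findRemoveA (a : Int) : List Int → Option (List Int)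
  | [] => none
  | b :: bs => if a < b then some bs else (findRemoveA a bs).map (fun t => b :: t)

-- outer loop "for i in A", state = (answer, current B list)
def loopA : List Int → Int → List Int → Int
  | [], answer, _ => answer
  | a :: as, answer, B =>
      match findRemoveA a B with
      | some B' => loopA as (answer + 1) B'
      | none => loopA as answer B

def solution (A : List Int) (B : List Int) : Int :=
  loopA (PySem.List.sorted A (fun x => x) false) 0 (PySem.List.sorted B (fun x => x) false)

-- ===== PORT B =====
-- "while i < len(As) and j < len(Bs): ..." — pointers rendered as the remaining suffixes
def loopB : List Int → List Int → Int → Int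
  | _, [], ans => ans
  | [], _ :: _, ans => ans
  | a :: as, b :: bs, ans => if a < b then loopB as bs (ans + 1) else loopB (a :: as) bs ans

def solution_alt (A : List Int) (B : List Int) : Int :=
  loopB (PySem.List.sorted A (fun x => x) false) (PySem.List.sorted B (fun x => x) false) 0

-- ===== PRECONDITION & SPEC =====
def Spec_solution (A : List Int) (B : List Int) (out : Int) : Prop := out = solution_alt A B
instance (A : List Int) (B : List Int) (out : Int) : Decidable (Spec_solution A B out) := by unfold Spec_solution; infer_instance

-- ===== CLAIM (what is proved, stated in full; the proofs are below) =====
def Claim_equal_solution : Prop := ∀ (A : List Int) (B : List Int), Dom_solution A B → Spec_solution A B (solution A B)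

-- ===== LEMMAS AND PROOFS =====

-- scanning past a prefix S whose elements are all ≤ a
theorem findRemoveA_append (a : Int) (S R : List Int) (h : ∀ s ∈ S, ¬ a < s) :
    findRemoveA a (S ++ R) = (findRemoveA a R).map (fun t => S ++ t) := by
  induction S with
  | nil => cases h : findRemoveA a R <;> simp [h]
  | cons s S ih =>
      have hs : ¬ a < s := h s (by simp)
      simp only [List.cons_append, findRemoveA, if_neg hs,
        ih (fun x hx => h x (by simp [hx]))]
      cases findRemoveA a R <;> simp

-- Invariant: A's remaining B list is S ++ R where S are passed-over elements (all ≤ every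
-- remaining element of the A side) and R is B's remaining suffix.
theorem loopA_eq_loopB (As : List Int) (R S : List Int) (ans : Int)
    (hA : As.Pairwise (· ≤ ·))
    (hS : ∀ s ∈ S, ∀ x ∈ As, s ≤ x) :
    loopA As ans (S ++ R) = loopB As R ans := by
  induction As generalizing S R ans with
  | nil =>
      cases R <;> simp [loopA, loopB]
  | cons a as ihA =>
      have hAtail : as.Pairwise (· ≤ ·) := (List.pairwise_cons.mp hA).2
      have hax : ∀ x ∈ as, a ≤ x := (List.pairwise_cons.mp hA).1
      induction R generalizing S ans with
      | nil =>
          have hnone : findRemoveA a S = none := by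
            have := findRemoveA_append a S []
              (fun s hs => not_lt.mpr (hS s hs a (by simp)))
            simpa [findRemoveA] using this
          have : loopA as ans S = loopB as [] ans := by
            have := ihA ([]) S ans hAtail
              (fun s hs x hx => hS s hs x (by simp [hx]))
            simpa using this
          simp [loopA, hnone, loopB, this]
      | cons b bs ihR =>
          by_cases hab : a < b
          · have hsome : findRemoveA a (S ++ b :: bs) = some (S ++ bs) := by
              rw [findRemoveA_append a S (b :: bs)
                (fun s hs => not_lt.mpr (hS s hs a (by simp)))]
              simp [findRemoveA, hab]
            have hih := ihA bs S (ans + 1) hAtail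
              (fun s hs x hx => hS s hs x (by simp [hx]))
            simp [loopA, hsome, loopB, hab, hih]
          · have hS' : ∀ s ∈ S ++ [b], ∀ x ∈ a :: as, s ≤ x := by
              intro s hs x hx
              rcases List.mem_append.mp hs with h1 | h1
              · exact hS s h1 x hx
              · have hb : s = b := by simpa using h1
                subst hb
                have hba : s ≤ a := not_lt.mp hab
                rcases List.mem_cons.mp hx with rfl | hx'
                · exact hba
                · exact le_trans hba (hax x hx')
            have hih := ihR (S ++ [b]) ans hS'
            simp only [List.append_assoc, List.singleton_append] at hih
            simp [loopB, hab, hih]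

-- ===== VERDICT (by name: the statement is the Claim_ definition above) =====
theorem solution_spec : Claim_equal_solution := by
  intro A B _
  unfold Spec_solution solution solution_alt
  have := loopA_eq_loopB (PySem.List.sorted A (fun x => x) false)
    (PySem.List.sorted B (fun x => x) false) [] 0
    (PySem.List.sorted_pairwise ..) (by simp)
  simpa using this
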